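-- pv_equiv track=rewrite | github.com/thesavant42/retrorecon | app.py | _parse_tag_expression
-- ===== SOURCE A (Python) =====
-- from typing import Any, Dict, List, Optional, Tuple, Union
--
-- def _parse_tag_expression(tokens: List[str], pos: int = 0) -> Tuple[str, List[str], int]:
--     """Recursive descent parser returning SQL and params."""
--
--     def parse_or(p: int) -> Tuple[str, List[str], int]:
--         sql, params, p = parse_and(p)
--         while p < len(tokens):
--             t = tokens[p].upper()
--             if t == 'OR':
--                 p += 1
--                 rhs_sql, rhs_params, p = parse_and(p)
--                 sql = f"({sql} OR {rhs_sql})"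
--                 params.extend(rhs_params)
--             else:
--                 break
--         return sql, params, p
--
--     def parse_and(p: int) -> Tuple[str, List[str], int]:
--         sql, params, p = parse_not(p)
--         while p < len(tokens):
--             t = tokens[p].upper()
--             if t == 'AND':
--                 p += 1
--             elif t in ('OR', ')'):
--                 break
--             else:
--                 # implicit AND
--                 pass
--             rhs_sql, rhs_params, p = parse_not(p)
--             sql = f"({sql} AND {rhs_sql})"
--             params.extend(rhs_params)
--         return sql, params, p
--
--     def parse_not(p: int) -> Tuple[str, List[str], int]:
--         if p < len(tokens) and tokens[p].upper() == 'NOT':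
--             p += 1
--             sql, params, p = parse_not(p)
--             return f"(NOT {sql})", params, p
--         return parse_primary(p)
--
--     def parse_primary(p: int) -> Tuple[str, List[str], int]:
--         if p >= len(tokens):
--             raise ValueError('Unexpected end of expression')
--         tok = tokens[p]
--         if tok == '(':  # parse subexpression
--             sql, params, p = parse_or(p + 1)
--             if p >= len(tokens) or tokens[p] != ')':
--                 raise ValueError('Unmatched parenthesis')
--             return sql, params, p + 1
--         if tok == ')':
--             raise ValueError('Unexpected )')
--         return "has_tag(tags, ?)", [tok], p + 1
--
--     return parse_or(pos)
-- ===== SOURCE B (Python) =====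
-- from typing import List, Tuple
--
-- def _parse_tag_expression(tokens: List[str], pos: int = 0) -> Tuple[str, List[str], int]:
--     """Precedence-climbing parser returning SQL and params."""
--     n = len(tokens)
--
--     def parse_atom(p: int) -> Tuple[str, List[str], int]:
--         if p < n and tokens[p].upper() == 'NOT':
--             sql, params, p = parse_atom(p + 1)
--             return f"(NOT {sql})", params, p
--         if p >= n:
--             raise ValueError('Unexpected end of expression')
--         tok = tokens[p]
--         if tok == '(':
--             sql, params, p = parse_expr(p + 1, 0)
--             if p >= n or tokens[p] != ')':
--                 raise ValueError('Unmatched parenthesis')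
--             return sql, params, p + 1
--         if tok == ')':
--             raise ValueError('Unexpected )')
--         return "has_tag(tags, ?)", [tok], p + 1
--
--     def parse_expr(p: int, min_prec: int) -> Tuple[str, List[str], int]:
--         sql, params, p = parse_atom(p)
--         while p < n:
--             t = tokens[p].upper()
--             if t == ')':
--                 break
--             if t == 'OR':
--                 prec, q = 0, p + 1
--             elif t == 'AND':
--                 prec, q = 1, p + 1
--             else:
--                 prec, q = 1, p  # an operand follows an operand: implicit AND
--             if prec < min_prec:
--                 break
--             rhs_sql, rhs_params, q = parse_expr(q, prec + 1)
--             if prec == 0: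
--                 sql = f"({sql} OR {rhs_sql})"
--             else:
--                 sql = f"({sql} AND {rhs_sql})"
--             params = params + rhs_params
--             p = q
--         return sql, params, p
--
--     return parse_expr(pos, 0)
-- ===== Notes on version B (the rewrite author's own statement) =====
-- stated objective: alternative
-- what changed: Replaces A's three-level recursive-descent parser (parse_or/parse_and/parse_not, one function and one while-loop per precedence level) with a single precedence-climbing parser: one parse_expr(p, min_prec) loop over an operator table (OR=0, AND/implicit-AND=1) plus one atom parser that folds A's parse_not and parse_primary together.
import Mathlib
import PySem

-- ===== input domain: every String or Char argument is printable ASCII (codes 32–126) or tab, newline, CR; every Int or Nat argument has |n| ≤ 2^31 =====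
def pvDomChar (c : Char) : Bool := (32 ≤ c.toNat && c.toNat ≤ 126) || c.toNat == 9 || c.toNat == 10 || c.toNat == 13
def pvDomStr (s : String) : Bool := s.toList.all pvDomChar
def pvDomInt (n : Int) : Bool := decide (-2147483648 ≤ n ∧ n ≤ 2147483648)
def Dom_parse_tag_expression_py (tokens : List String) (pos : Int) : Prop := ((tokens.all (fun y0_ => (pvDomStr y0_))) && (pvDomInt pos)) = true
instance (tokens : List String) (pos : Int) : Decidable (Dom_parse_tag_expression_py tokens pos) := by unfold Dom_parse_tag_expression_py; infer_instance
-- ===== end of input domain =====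

-- B re-implements A's three-level recursive-descent parser as a single precedence-climbing
-- parser (one expression function with a minimal-precedence bound); same return value wherever
-- A returns (objective: alternative decomposition, not speed).

-- ===== PORT A =====
-- Literal transliteration of _parse_tag_expression (Source A): mutually recursive
-- parse_or / parse_and / parse_not / parse_primary, the two while-loops as the
-- tail-recursive helpers pA_orLoop / pA_andLoop.  Fuel only makes the mutual
-- recursion total (it is never exhausted where the Python returns); `none` is
-- exactly where the Python raises (ValueError, or IndexError from a negative
-- index below -len).  Token reads are PySem.List.pyGet? (Python indexing,
-- including negative-index wraparound).
mutual
def pA_primary (ts : List String) : Nat → Int → Option (String × List String × Int)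
  | 0, _ => none
  | fuel+1, p =>
    if p < (ts.length : Int) then
      match PySem.List.pyGet? ts p with
      | none => none
      | some tok =>
        if tok = "(" then
          match pA_or ts fuel (p+1) with
          | none => none
          | some (sql, params, q) =>
            if q < (ts.length : Int) then
              match PySem.List.pyGet? ts q with
              | none => none
              | some tq => if tq = ")" then some (sql, params, q+1) else none
            else none
        else if tok = ")" then none
        else some ("has_tag(tags, ?)", [tok], p+1)
    else none

def pA_not (ts : List String) : Nat → Int → Option (String × List String × Int)
  | 0, _ => none
  | fuel+1, p =>
    if p < (ts.length : Int) then
      match PySem.List.pyGet? ts p with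
      | none => none
      | some tok =>
        if PySem.Str.upper tok = "NOT" then
          match pA_not ts fuel (p+1) with
          | none => none
          | some (sql, params, q) => some ("(NOT " ++ sql ++ ")", params, q)
        else pA_primary ts fuel p
    else pA_primary ts fuel p

def pA_andLoop (ts : List String) : Nat → String → List String → Int → Option (String × List String × Int)
  | 0, _, _, _ => none
  | fuel+1, sql, params, p =>
    if p < (ts.length : Int) then
      match PySem.List.pyGet? ts p with
      | none => none
      | some tokp =>
        let t := PySem.Str.upper tokp
        if t = "AND" then
          match pA_not ts fuel (p+1) with
          | none => none
          | some (rs, rp, q) => pA_andLoop ts fuel ("(" ++ sql ++ " AND " ++ rs ++ ")") (params ++ rp) q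
        else if t = "OR" ∨ t = ")" then some (sql, params, p)
        else  -- implicit AND
          match pA_not ts fuel p with
          | none => none
          | some (rs, rp, q) => pA_andLoop ts fuel ("(" ++ sql ++ " AND " ++ rs ++ ")") (params ++ rp) q
    else some (sql, params, p)

def pA_and (ts : List String) : Nat → Int → Option (String × List String × Int)
  | 0, _ => none
  | fuel+1, p =>
    match pA_not ts fuel p with
    | none => none
    | some (sql, params, q) => pA_andLoop ts fuel sql params q

def pA_orLoop (ts : List String) : Nat → String → List String → Int → Option (String × List String × Int)
  | 0, _, _, _ => none
  | fuel+1, sql, params, p =>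
    if p < (ts.length : Int) then
      match PySem.List.pyGet? ts p with
      | none => none
      | some tokp =>
        if PySem.Str.upper tokp = "OR" then
          match pA_and ts fuel (p+1) with
          | none => none
          | some (rs, rp, q) => pA_orLoop ts fuel ("(" ++ sql ++ " OR " ++ rs ++ ")") (params ++ rp) q
        else some (sql, params, p)
    else some (sql, params, p)

def pA_or (ts : List String) : Nat → Int → Option (String × List String × Int)
  | 0, _ => none
  | fuel+1, p =>
    match pA_and ts fuel p with
    | none => none
    | some (sql, params, q) => pA_orLoop ts fuel sql params q
end

def parse_tag_expression_py (tokens : List String) (pos : Int) : String × List String × Int :=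
  match pA_or tokens (16 * tokens.length + 8) pos with
  | some r => r
  | none => ("", [], 0)   -- unreachable under Pre_ (Python raises there)

-- ===== PORT B =====
-- Literal transliteration of B (Source B): precedence climbing.  pB_atom is
-- parse_atom (NOT-prefix / parenthesis / tag), pB_expr / pB_loop are
-- parse_expr with its while-loop (minPrec is min_prec; OR has precedence 0,
-- AND — explicit or implicit — precedence 1).  Same fuel convention as port A.
mutual
def pB_atom (ts : List String) : Nat → Int → Option (String × List String × Int)
  | 0, _ => none
  | fuel+1, p =>
    if p < (ts.length : Int) then
      match PySem.List.pyGet? ts p with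
      | none => none
      | some tok =>
        if PySem.Str.upper tok = "NOT" then
          match pB_atom ts fuel (p+1) with
          | none => none
          | some (sql, params, q) => some ("(NOT " ++ sql ++ ")", params, q)
        else if tok = "(" then
          match pB_expr ts fuel (p+1) 0 with
          | none => none
          | some (sql, params, q) =>
            if q < (ts.length : Int) then
              match PySem.List.pyGet? ts q with
              | none => none
              | some tq => if tq = ")" then some (sql, params, q+1) else none
            else none
        else if tok = ")" then none
        else some ("has_tag(tags, ?)", [tok], p+1)
    else none

def pB_loop (ts : List String) : Nat → String → List String → Int → Nat → Option (String × List String × Int)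
  | 0, _, _, _, _ => none
  | fuel+1, sql, params, p, minPrec =>
    if p < (ts.length : Int) then
      match PySem.List.pyGet? ts p with
      | none => none
      | some tokp =>
        let t := PySem.Str.upper tokp
        if t = ")" then some (sql, params, p)
        else
          let pq : Nat × Int := if t = "OR" then (0, p+1) else if t = "AND" then (1, p+1) else (1, p)
          if pq.1 < minPrec then some (sql, params, p)
          else
            match pB_expr ts fuel pq.2 (pq.1 + 1) with
            | none => none
            | some (rs, rp, q) =>
              let sql' := if pq.1 = 0 then "(" ++ sql ++ " OR " ++ rs ++ ")" else "(" ++ sql ++ " AND " ++ rs ++ ")"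
              pB_loop ts fuel sql' (params ++ rp) q minPrec
    else some (sql, params, p)

def pB_expr (ts : List String) : Nat → Int → Nat → Option (String × List String × Int)
  | 0, _, _ => none
  | fuel+1, p, minPrec =>
    match pB_atom ts fuel p with
    | none => none
    | some (sql, params, q) => pB_loop ts fuel sql params q minPrec
end

def parse_tag_expression_py_alt (tokens : List String) (pos : Int) : String × List String × Int :=
  match pB_expr tokens (16 * tokens.length + 8) pos 0 with
  | some r => r
  | none => ("", [], 0)

-- ===== PRECONDITION & SPEC =====
-- The token-stream well-formedness scan: one left-to-right pass with a depth
-- counter and a flag 'after' (are we right after a complete operand?).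
-- It is true exactly when the parse starting in state (depth 0, expecting an
-- operand) reaches end of input or a top-level ')' after an operand.
def pvTagScan : List String → Nat → Bool → Bool
  | [], d, after => after && d == 0
  | t :: rest, d, after =>
    let u := PySem.Str.upper t
    if after && u == ")" then (if d == 0 then true else pvTagScan rest (d-1) true)
    else if after && (u == "OR" || u == "AND") then pvTagScan rest d false
    else  -- an operand starts here (implicit AND if 'after')
      if u == "NOT" then pvTagScan rest d false
      else if u == "(" then pvTagScan rest (d+1) false
      else if u == ")" then false
      else pvTagScan rest d true

-- Pre_ holds exactly where the Python A returns normally: a well-formed tag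
-- expression starts at index pos.  For a negative pos Python's indexing wraps
-- around, so the scanned token stream is tokens[len+pos:] ++ tokens; below
-- -len the first read raises IndexError, and on malformed streams A raises
-- ValueError — those inputs are exactly the ones excluded.
def Pre_parse_tag_expression_py (tokens : List String) (pos : Int) : Prop :=
  if 0 ≤ pos then pvTagScan (tokens.drop pos.toNat) 0 false = true
  else -(tokens.length : Int) ≤ pos ∧ pvTagScan (tokens.drop (tokens.length + pos).toNat ++ tokens) 0 false = true
instance (tokens : List String) (pos : Int) : Decidable (Pre_parse_tag_expression_py tokens pos) := by unfold Pre_parse_tag_expression_py; infer_instance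

def pvWitness_parse_tag_expression_py : List String × Int := (["alpha", "AND", "(", "beta", "OR", "not", "gamma", ")"], 0)

def Spec_parse_tag_expression_py (tokens : List String) (pos : Int) (out : String × List String × Int) : Prop := out = parse_tag_expression_py_alt tokens pos
instance (tokens : List String) (pos : Int) (out : String × List String × Int) : Decidable (Spec_parse_tag_expression_py tokens pos out) := by unfold Spec_parse_tag_expression_py; infer_instance

-- ===== CLAIM (what is proved, stated in full; the proofs are below) =====
def Claim_equal_parse_tag_expression_py : Prop := ∀ (tokens : List String) (pos : Int), Dom_parse_tag_expression_py tokens pos → Pre_parse_tag_expression_py tokens pos → Spec_parse_tag_expression_py tokens pos (parse_tag_expression_py tokens pos)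

-- ===== LEMMAS AND PROOFS =====

-- Exit condition of A's parse_and loop: it stops only at end of input or on a
-- token that uppercases to "OR" or ")".
def pvStopA (ts : List String) (q : Int) : Prop :=
  (ts.length : Int) ≤ q ∨
    ∃ tok, PySem.List.pyGet? ts q = some tok ∧ (PySem.Str.upper tok = "OR" ∨ PySem.Str.upper tok = ")")

-- Progress and stop facts about port A, by induction on fuel.
-- A successful Python index read means the index is in range.
theorem pvSomeRange {ts : List String} {p : Int} {tok : String} (h : PySem.List.pyGet? ts p = some tok) :
    -(ts.length : Int) ≤ p ∧ p < (ts.length : Int) := by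
  have hin : PySem.Raise.InRange ts.length p := by
    by_contra hc
    rw [← PySem.List.pyGet?_eq_none_iff] at hc
    rw [h] at hc
    cases hc
  cases hin
  constructor <;> omega

-- Progress (every parsed piece advances the position past at least one real
-- read) and the andLoop exit condition, by induction on fuel.
theorem pvProgA (ts : List String) : ∀ fuel : Nat,
    (∀ p s ps q, pA_primary ts fuel p = some (s, ps, q) → p < q ∧ -(ts.length : Int) < q) ∧
    (∀ p s ps q, pA_not ts fuel p = some (s, ps, q) → p < q ∧ -(ts.length : Int) < q) ∧
    (∀ sql params p s ps q, pA_andLoop ts fuel sql params p = some (s, ps, q) → p ≤ q ∧ pvStopA ts q) ∧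
    (∀ p s ps q, pA_and ts fuel p = some (s, ps, q) → p < q ∧ pvStopA ts q) ∧
    (∀ sql params p s ps q, pA_orLoop ts fuel sql params p = some (s, ps, q) → p ≤ q) ∧
    (∀ p s ps q, pA_or ts fuel p = some (s, ps, q) → p < q) := by
  intro fuel
  induction fuel with
  | zero =>
    refine ⟨?_, ?_, ?_, ?_, ?_, ?_⟩ <;> intros <;> simp_all [pA_primary, pA_not, pA_andLoop, pA_and, pA_orLoop, pA_or]
  | succ f ih =>
    obtain ⟨ihPrim, ihNot, ihAndL, ihAnd, ihOrL, ihOr⟩ := ih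
    have hPrim : ∀ p s ps q, pA_primary ts (f+1) p = some (s, ps, q) → p < q ∧ -(ts.length : Int) < q := by
      intro p s ps q h
      simp only [pA_primary] at h
      split at h
      · cases hg : PySem.List.pyGet? ts p with
        | none => rw [hg] at h; simp at h
        | some tok =>
          rw [hg] at h
          have hr := pvSomeRange hg
          simp only at h
          split at h
          · -- "(" subexpression
            cases hor : pA_or ts f (p+1) with
            | none => rw [hor] at h; simp at h
            | some r =>
              obtain ⟨s1, ps1, q1⟩ := r
              rw [hor] at h
              simp only at h
              have hq1 := ihOr _ _ _ _ hor
              split at h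
              · cases hg2 : PySem.List.pyGet? ts q1 with
                | none => rw [hg2] at h; simp at h
                | some tq =>
                  rw [hg2] at h
                  simp only at h
                  split at h
                  · obtain ⟨rfl, rfl, rfl⟩ : s1 = s ∧ ps1 = ps ∧ q1 + 1 = q := by
                      simpa using h
                    have := (pvSomeRange hg2).1
                    omega
                  · simp at h
              · simp at h
          · split at h
            · simp at h
            · obtain ⟨rfl, rfl, rfl⟩ : "has_tag(tags, ?)" = s ∧ [tok] = ps ∧ p + 1 = q := by simpa using h
              omega
      · simp at h
    have hNot : ∀ p s ps q, pA_not ts (f+1) p = some (s, ps, q) → p < q ∧ -(ts.length : Int) < q := by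
      intro p s ps q h
      simp only [pA_not] at h
      split at h
      · cases hg : PySem.List.pyGet? ts p with
        | none => rw [hg] at h; simp at h
        | some tok =>
          rw [hg] at h
          simp only at h
          split at h
          · cases hn : pA_not ts f (p+1) with
            | none => rw [hn] at h; simp at h
            | some r =>
              obtain ⟨s1, ps1, q1⟩ := r
              rw [hn] at h
              have hq1 := ihNot _ _ _ _ hn
              obtain ⟨rfl, rfl, rfl⟩ : "(NOT " ++ s1 ++ ")" = s ∧ ps1 = ps ∧ q1 = q := by simpa using h
              omega
          · exact ihPrim _ _ _ _ h
      · exact ihPrim _ _ _ _ h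
    have hAndL : ∀ sql params p s ps q, pA_andLoop ts (f+1) sql params p = some (s, ps, q) → p ≤ q ∧ pvStopA ts q := by
      intro sql params p s ps q h
      simp only [pA_andLoop] at h
      split at h
      · cases hg : PySem.List.pyGet? ts p with
        | none => rw [hg] at h; simp at h
        | some tok =>
          rw [hg] at h
          simp only at h
          split at h
          · -- AND
            cases hn : pA_not ts f (p+1) with
            | none => rw [hn] at h; simp at h
            | some r =>
              obtain ⟨s1, ps1, q1⟩ := r
              rw [hn] at h
              have h1 := ihNot _ _ _ _ hn
              have h2 := ihAndL _ _ _ _ _ _ h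
              exact ⟨by omega, h2.2⟩
          · split at h
            · -- break on OR / ')'
              obtain ⟨rfl, rfl, rfl⟩ : sql = s ∧ params = ps ∧ p = q := by simpa using h
              rename_i ht _
              exact ⟨le_refl _, Or.inr ⟨tok, hg, by assumption⟩⟩
            · -- implicit AND
              cases hn : pA_not ts f p with
              | none => rw [hn] at h; simp at h
              | some r =>
                obtain ⟨s1, ps1, q1⟩ := r
                rw [hn] at h
                have h1 := ihNot _ _ _ _ hn
                have h2 := ihAndL _ _ _ _ _ _ h
                exact ⟨by omega, h2.2⟩
      · obtain ⟨rfl, rfl, rfl⟩ : sql = s ∧ params = ps ∧ p = q := by simpa using h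
        exact ⟨le_refl _, Or.inl (by omega)⟩
    have hAnd : ∀ p s ps q, pA_and ts (f+1) p = some (s, ps, q) → p < q ∧ pvStopA ts q := by
      intro p s ps q h
      simp only [pA_and] at h
      cases hn : pA_not ts f p with
      | none => rw [hn] at h; simp at h
      | some r =>
        obtain ⟨s1, ps1, q1⟩ := r
        rw [hn] at h
        have h1 := ihNot _ _ _ _ hn
        have h2 := ihAndL _ _ _ _ _ _ h
        exact ⟨by omega, h2.2⟩
    have hOrL : ∀ sql params p s ps q, pA_orLoop ts (f+1) sql params p = some (s, ps, q) → p ≤ q := by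
      intro sql params p s ps q h
      simp only [pA_orLoop] at h
      split at h
      · cases hg : PySem.List.pyGet? ts p with
        | none => rw [hg] at h; simp at h
        | some tok =>
          rw [hg] at h
          simp only at h
          split at h
          · cases ha : pA_and ts f (p+1) with
            | none => rw [ha] at h; simp at h
            | some r =>
              obtain ⟨s1, ps1, q1⟩ := r
              rw [ha] at h
              have h1 := ihAnd _ _ _ _ ha
              have h2 := ihOrL _ _ _ _ _ _ h
              omega
          · obtain ⟨rfl, rfl, rfl⟩ : sql = s ∧ params = ps ∧ p = q := by simpa using h
            exact le_refl _
      · obtain ⟨rfl, rfl, rfl⟩ : sql = s ∧ params = ps ∧ p = q := by simpa using h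
        exact le_refl _
    have hOr : ∀ p s ps q, pA_or ts (f+1) p = some (s, ps, q) → p < q := by
      intro p s ps q h
      simp only [pA_or] at h
      cases ha : pA_and ts f p with
      | none => rw [ha] at h; simp at h
      | some r =>
        obtain ⟨s1, ps1, q1⟩ := r
        rw [ha] at h
        have h1 := ihAnd _ _ _ _ ha
        have h2 := ihOrL _ _ _ _ _ _ h
        omega
    exact ⟨hPrim, hNot, hAndL, hAnd, hOrL, hOr⟩

theorem pvLoop2 (ts : List String) (fuel : Nat) (hf : 1 ≤ fuel) (sql : String) (params : List String) (p : Int) (hp : -(ts.length : Int) ≤ p) :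
    pB_loop ts fuel sql params p 2 = some (sql, params, p) := by
  obtain ⟨f, rfl⟩ : ∃ f, fuel = f + 1 := ⟨fuel - 1, by omega⟩
  simp only [pB_loop]
  split
  · rename_i hlt
    cases hg : PySem.List.pyGet? ts p with
    | none =>
      rw [PySem.List.pyGet?_eq_none_iff] at hg
      exact absurd (by constructor <;> omega) hg
    | some tok =>
      simp only
      by_cases h1 : PySem.Str.upper tok = ")"
      · simp [h1]
      · by_cases h2 : PySem.Str.upper tok = "OR"
        · simp [h2]
        · by_cases h3 : PySem.Str.upper tok = "AND" <;> simp [h1, h2, h3]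
  · rfl

theorem pvFarNeg (ts : List String) (p : Int) (hp : p < -(ts.length : Int)) :
    (∀ fa, 3 ≤ fa → pA_or ts fa p = none) ∧ (∀ fb, 2 ≤ fb → pB_expr ts fb p 0 = none) := by
  have hg : PySem.List.pyGet? ts p = none := by
    rw [PySem.List.pyGet?_eq_none_iff]
    intro h
    cases h
    omega
  constructor
  · intro fa hfa
    obtain ⟨a, rfl⟩ : ∃ a, fa = a + 3 := ⟨fa - 3, by omega⟩
    simp only [pA_or, pA_and, pA_not]
    by_cases hlt : p < (ts.length : Int)
    · simp [hlt, hg]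
    · omega
  · intro fb hfb
    obtain ⟨b, rfl⟩ : ∃ b, fb = b + 2 := ⟨fb - 2, by omega⟩
    simp only [pB_expr, pB_atom]
    by_cases hlt : p < (ts.length : Int)
    · simp [hlt, hg]
    · omega

-- A's parse_and loop returns immediately on its own exit condition.
theorem pvAndLoopStop (ts : List String) (f : Nat) (hf : 1 ≤ f) (sql : String) (params : List String) (q : Int) (hst : pvStopA ts q) :
    pA_andLoop ts f sql params q = some (sql, params, q) := by
  obtain ⟨g, rfl⟩ : ∃ g, f = g + 1 := ⟨f - 1, by omega⟩
  cases hst with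
  | inl hle => simp only [pA_andLoop, if_neg (not_lt.mpr hle)]
  | inr hex =>
    obtain ⟨tk, hgq, hor⟩ := hex
    have hq := pvSomeRange hgq
    simp only [pA_andLoop, if_pos hq.2, hgq]
    cases hor with
    | inl h => simp [h]
    | inr h => simp [h]

theorem pvNotNone (ts : List String) (p : Int) (f : Nat) (hpn : ¬ p < (ts.length : Int)) (hf : 2 ≤ f) :
    pA_not ts f p = none := by
  obtain ⟨a, rfl⟩ : ∃ a, f = a + 2 := ⟨f - 2, by omega⟩
  simp [pA_not, pA_primary, hpn]

theorem pvAtomNone (ts : List String) (p : Int) (f : Nat) (hpn : ¬ p < (ts.length : Int)) (hf : 1 ≤ f) :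
    pB_atom ts f p = none := by
  obtain ⟨a, rfl⟩ : ∃ a, f = a + 1 := ⟨f - 1, by omega⟩
  simp [pB_atom, hpn]

theorem pvMain (ts : List String) : ∀ k : Nat, ∀ p : Int, (((ts.length : Int) - p).toNat) ≤ k →
    (∀ fa fb, 8 * (((ts.length : Int) - p).toNat) + 3 ≤ fa → 8 * (((ts.length : Int) - p).toNat) + 3 ≤ fb →
      pA_not ts fa p = pB_atom ts fb p) ∧
    (∀ fa fb, 8 * (((ts.length : Int) - p).toNat) + 3 ≤ fa → 8 * (((ts.length : Int) - p).toNat) + 4 ≤ fb →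
      pB_expr ts fb p 2 = pA_not ts fa p) ∧
    (∀ fa fb sql params, 8 * (((ts.length : Int) - p).toNat) + 4 ≤ fa → 8 * (((ts.length : Int) - p).toNat) + 5 ≤ fb →
      pB_loop ts fb sql params p 1 = pA_andLoop ts fa sql params p) ∧
    (∀ fa fa' fb sql params, 8 * (((ts.length : Int) - p).toNat) + 4 ≤ fa → 8 * (((ts.length : Int) - p).toNat) + 6 ≤ fa' → 8 * (((ts.length : Int) - p).toNat) + 5 ≤ fb →
      pB_loop ts fb sql params p 0 = (pA_andLoop ts fa sql params p).bind (fun r => pA_orLoop ts fa' r.1 r.2.1 r.2.2)) ∧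
    (∀ fa fb, 8 * (((ts.length : Int) - p).toNat) + 5 ≤ fa → 8 * (((ts.length : Int) - p).toNat) + 5 ≤ fb →
      pA_and ts fa p = pB_expr ts fb p 1) ∧
    (∀ fa fb, 8 * (((ts.length : Int) - p).toNat) + 6 ≤ fa → 8 * (((ts.length : Int) - p).toNat) + 5 ≤ fb →
      pA_or ts fa p = pB_expr ts fb p 0) := by
  intro k
  induction k using Nat.strong_induction_on with
  | _ k ih =>
  intro p hk
  have hn0 : (0:Int) ≤ (ts.length : Int) := by positivity
  -- E_not
  have Enot : ∀ fa fb, 8 * (((ts.length : Int) - p).toNat) + 3 ≤ fa → 8 * (((ts.length : Int) - p).toNat) + 3 ≤ fb → pA_not ts fa p = pB_atom ts fb p := by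
    intro fa fb hfa hfb
    obtain ⟨a, rfl⟩ : ∃ x, fa = x + 1 := ⟨fa - 1, by omega⟩
    obtain ⟨b, rfl⟩ : ∃ x, fb = x + 1 := ⟨fb - 1, by omega⟩
    by_cases hpn : p < (ts.length : Int)
    · simp only [pA_not, pB_atom, if_pos hpn]
      cases hg : PySem.List.pyGet? ts p with
      | none => simp
      | some tok =>
        simp only
        by_cases hnot : PySem.Str.upper tok = "NOT"
        · simp only [if_pos hnot]
          have hrec : pA_not ts a (p+1) = pB_atom ts b (p+1) := by
            have := (ih ((((ts.length : Int) - (p+1)).toNat)) (by omega) (p+1) (by omega)).1 a b (by omega) (by omega)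
            exact this
          rw [hrec]
        · simp only [if_neg hnot]
          obtain ⟨a', rfl⟩ : ∃ x, a = x + 1 := ⟨a - 1, by omega⟩
          simp only [pA_primary, if_pos hpn, hg]
          by_cases hpar : tok = "("
          · simp only [if_pos hpar]
            have horeq : pA_or ts a' (p+1) = pB_expr ts b (p+1) 0 := by
              have := (ih ((((ts.length : Int) - (p+1)).toNat)) (by omega) (p+1) (by omega)).2.2.2.2.2 a' b (by omega) (by omega)
              exact this
            rw [horeq]
          · simp only [if_neg hpar]
    · simp only [pA_not, if_neg hpn]
      rw [pvAtomNone ts p (b+1) hpn (by omega)]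
      obtain ⟨a', rfl⟩ : ∃ x, a = x + 1 := ⟨a - 1, by omega⟩
      simp [pA_primary, hpn]
  -- E2 : expr with min precedence 2 is exactly an atom (= A's parse_not)
  have E2 : ∀ fa fb, 8 * (((ts.length : Int) - p).toNat) + 3 ≤ fa → 8 * (((ts.length : Int) - p).toNat) + 4 ≤ fb → pB_expr ts fb p 2 = pA_not ts fa p := by
    intro fa fb hfa hfb
    obtain ⟨b, rfl⟩ : ∃ x, fb = x + 1 := ⟨fb - 1, by omega⟩
    simp only [pB_expr]
    rw [← Enot fa b hfa (by omega)]
    cases hnr : pA_not ts fa p with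
    | none => rfl
    | some r =>
      obtain ⟨s, ps, q⟩ := r
      simp only
      have hq := ((pvProgA ts fa).2.1) _ _ _ _ hnr
      exact pvLoop2 ts b (by omega) s ps q (by omega)
  -- L1 : B's loop at min precedence 1 is A's parse_and loop
  have L1 : ∀ fa fb sql params, 8 * (((ts.length : Int) - p).toNat) + 4 ≤ fa → 8 * (((ts.length : Int) - p).toNat) + 5 ≤ fb →
      pB_loop ts fb sql params p 1 = pA_andLoop ts fa sql params p := by
    intro fa fb sql params hfa hfb
    obtain ⟨a, rfl⟩ : ∃ x, fa = x + 1 := ⟨fa - 1, by omega⟩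
    obtain ⟨b, rfl⟩ : ∃ x, fb = x + 1 := ⟨fb - 1, by omega⟩
    by_cases hpn : p < (ts.length : Int)
    · simp only [pB_loop, pA_andLoop, if_pos hpn]
      cases hg : PySem.List.pyGet? ts p with
      | none => simp
      | some tok =>
        simp only
        by_cases h1 : PySem.Str.upper tok = ")"
        · simp [h1]
        · by_cases h2 : PySem.Str.upper tok = "OR"
          · simp [h2]
          · by_cases h3 : PySem.Str.upper tok = "AND"
            · simp only [h3, String.reduceEq, reduceIte, or_self]
              have he : pB_expr ts b (p+1) 2 = pA_not ts a (p+1) := by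
                have := (ih ((((ts.length : Int) - (p+1)).toNat)) (by omega) (p+1) (by omega)).2.1 a b (by omega) (by omega)
                exact this
              rw [he]
              cases hnr : pA_not ts a (p+1) with
              | none => rfl
              | some r =>
                obtain ⟨rs, rp, q⟩ := r
                simp only [Nat.lt_irrefl, if_false, Nat.one_ne_zero]
                have hq := ((pvProgA ts a).2.1) _ _ _ _ hnr
                exact (ih ((((ts.length : Int) - q).toNat)) (by omega) q (by omega)).2.2.1 a b _ _ (by omega) (by omega)
            · simp only [h1, h2, h3, reduceIte, or_self]
              have he : pB_expr ts b p 2 = pA_not ts a p := E2 a b (by omega) (by omega)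
              rw [he]
              cases hnr : pA_not ts a p with
              | none => rfl
              | some r =>
                obtain ⟨rs, rp, q⟩ := r
                simp only [Nat.lt_irrefl, if_false, Nat.one_ne_zero]
                have hq := ((pvProgA ts a).2.1) _ _ _ _ hnr
                exact (ih ((((ts.length : Int) - q).toNat)) (by omega) q (by omega)).2.2.1 a b _ _ (by omega) (by omega)
    · simp only [pB_loop, pA_andLoop, if_neg hpn]
  -- L0 : B's loop at min precedence 0 is A's parse_and loop followed by A's parse_or loop
  have L0 : ∀ fa fa' fb sql params, 8 * (((ts.length : Int) - p).toNat) + 4 ≤ fa → 8 * (((ts.length : Int) - p).toNat) + 6 ≤ fa' → 8 * (((ts.length : Int) - p).toNat) + 5 ≤ fb →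
      pB_loop ts fb sql params p 0 = (pA_andLoop ts fa sql params p).bind (fun r => pA_orLoop ts fa' r.1 r.2.1 r.2.2) := by
    intro fa fa' fb sql params hfa hfa' hfb
    obtain ⟨a, rfl⟩ : ∃ x, fa = x + 1 := ⟨fa - 1, by omega⟩
    obtain ⟨a', rfl⟩ : ∃ x, fa' = x + 1 := ⟨fa' - 1, by omega⟩
    obtain ⟨b, rfl⟩ : ∃ x, fb = x + 1 := ⟨fb - 1, by omega⟩
    by_cases hpn : p < (ts.length : Int)
    · simp only [pB_loop, pA_andLoop, if_pos hpn]
      cases hg : PySem.List.pyGet? ts p with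
      | none => simp
      | some tok =>
        simp only
        by_cases h1 : PySem.Str.upper tok = ")"
        · simp only [h1, String.reduceEq, reduceIte, or_true, Option.bind]
          simp only [pA_orLoop, if_pos hpn, hg, h1, String.reduceEq, reduceIte]
        · by_cases h2 : PySem.Str.upper tok = "OR"
          · simp only [h2, String.reduceEq, reduceIte, or_false, Option.bind]
            simp only [pA_orLoop, if_pos hpn, hg, h2, reduceIte]
            have he : pA_and ts a' (p+1) = pB_expr ts b (p+1) 1 := by
              have := (ih ((((ts.length : Int) - (p+1)).toNat)) (by omega) (p+1) (by omega)).2.2.2.2.1 a' b (by omega) (by omega)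
              exact this
            rw [← he]
            cases har : pA_and ts a' (p+1) with
            | none => rfl
            | some r =>
              obtain ⟨rs, rp, q⟩ := r
              simp only [Nat.lt_irrefl, if_false]
              have hst := ((pvProgA ts a').2.2.2.1) _ _ _ _ har
              have hrec := (ih ((((ts.length : Int) - q).toNat)) (by omega) q (by omega)).2.2.2.1 (a+1) a' b ("(" ++ sql ++ " OR " ++ rs ++ ")") (params ++ rp) (by omega) (by omega) (by omega)
              rw [hrec]
              rw [pvAndLoopStop ts (a+1) (by omega) _ _ q hst.2]
              simp only [Option.bind]
          · by_cases h3 : PySem.Str.upper tok = "AND"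
            · simp only [h3, String.reduceEq, reduceIte, or_self]
              have he : pB_expr ts b (p+1) 2 = pA_not ts a (p+1) := by
                have := (ih ((((ts.length : Int) - (p+1)).toNat)) (by omega) (p+1) (by omega)).2.1 a b (by omega) (by omega)
                exact this
              rw [he]
              cases hnr : pA_not ts a (p+1) with
              | none => rfl
              | some r =>
                obtain ⟨rs, rp, q⟩ := r
                simp only [if_false, Nat.one_ne_zero, Nat.not_lt_zero, Option.bind]
                have hq := ((pvProgA ts a).2.1) _ _ _ _ hnr
                have hrec := (ih ((((ts.length : Int) - q).toNat)) (by omega) q (by omega)).2.2.2.1 a (a'+1) b ("(" ++ sql ++ " AND " ++ rs ++ ")") (params ++ rp) (by omega) (by omega) (by omega)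
                rw [hrec]
                rfl
            · simp only [h1, h2, h3, reduceIte, or_self]
              have he : pB_expr ts b p 2 = pA_not ts a p := E2 a b (by omega) (by omega)
              rw [he]
              cases hnr : pA_not ts a p with
              | none => rfl
              | some r =>
                obtain ⟨rs, rp, q⟩ := r
                simp only [if_false, Nat.one_ne_zero, Nat.not_lt_zero, Option.bind]
                have hq := ((pvProgA ts a).2.1) _ _ _ _ hnr
                have hrec := (ih ((((ts.length : Int) - q).toNat)) (by omega) q (by omega)).2.2.2.1 a (a'+1) b ("(" ++ sql ++ " AND " ++ rs ++ ")") (params ++ rp) (by omega) (by omega) (by omega)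
                rw [hrec]
                rfl
    · simp only [pB_loop, pA_andLoop, pA_orLoop, if_neg hpn, Option.bind]
  -- E_and
  have Eand : ∀ fa fb, 8 * (((ts.length : Int) - p).toNat) + 5 ≤ fa → 8 * (((ts.length : Int) - p).toNat) + 5 ≤ fb →
      pA_and ts fa p = pB_expr ts fb p 1 := by
    intro fa fb hfa hfb
    obtain ⟨a, rfl⟩ : ∃ x, fa = x + 1 := ⟨fa - 1, by omega⟩
    obtain ⟨b, rfl⟩ : ∃ x, fb = x + 1 := ⟨fb - 1, by omega⟩
    simp only [pA_and, pB_expr]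
    rw [← Enot a b (by omega) (by omega)]
    cases hnr : pA_not ts a p with
    | none => rfl
    | some r =>
      obtain ⟨s, ps, q⟩ := r
      simp only
      have hq := ((pvProgA ts a).2.1) _ _ _ _ hnr
      by_cases hpn : p < (ts.length : Int)
      · rw [(ih ((((ts.length : Int) - q).toNat)) (by omega) q (by omega)).2.2.1 a b s ps (by omega) (by omega)]
      · rw [pvNotNone ts p a hpn (by omega)] at hnr
        cases hnr
  -- E_or
  have Eor : ∀ fa fb, 8 * (((ts.length : Int) - p).toNat) + 6 ≤ fa → 8 * (((ts.length : Int) - p).toNat) + 5 ≤ fb →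
      pA_or ts fa p = pB_expr ts fb p 0 := by
    intro fa fb hfa hfb
    obtain ⟨a, rfl⟩ : ∃ x, fa = x + 2 := ⟨fa - 2, by omega⟩
    obtain ⟨b, rfl⟩ : ∃ x, fb = x + 1 := ⟨fb - 1, by omega⟩
    simp only [pA_or, pA_and, pB_expr]
    rw [← Enot a b (by omega) (by omega)]
    cases hnr : pA_not ts a p with
    | none => rfl
    | some r =>
      obtain ⟨s, ps, q⟩ := r
      simp only
      have hq := ((pvProgA ts a).2.1) _ _ _ _ hnr
      by_cases hpn : p < (ts.length : Int)
      · have hrec := (ih ((((ts.length : Int) - q).toNat)) (by omega) q (by omega)).2.2.2.1 a (a+1) b s ps (by omega) (by omega) (by omega)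
        rw [hrec]
        cases hal : pA_andLoop ts a s ps q with
        | none => rfl
        | some r2 => simp only [Option.bind]
      · rw [pvNotNone ts p a hpn (by omega)] at hnr
        cases hnr
  exact ⟨Enot, E2, L1, L0, Eand, Eor⟩

-- Top-level equivalence.
theorem parse_tag_expression_py_spec : Claim_equal_parse_tag_expression_py := by
  unfold Claim_equal_parse_tag_expression_py Spec_parse_tag_expression_py
  intro tokens pos _ _
  unfold parse_tag_expression_py parse_tag_expression_py_alt
  by_cases hp : pos < -(tokens.length : Int)
  · rw [(pvFarNeg tokens pos hp).1 _ (by omega), (pvFarNeg tokens pos hp).2 _ (by omega)]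
  · rw [(pvMain tokens (((tokens.length : Int) - pos).toNat) pos (le_refl _)).2.2.2.2.2
      (16 * tokens.length + 8) (16 * tokens.length + 8) (by omega) (by omega)]
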